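-- pv_equiv track=rewrite | github.com/czhhbp/EENas | allutils.py | trans_pop
-- ===== SOURCE A (Python) =====
-- def trans_pop(pop):
--     pool = []
--     for gene in pop:
--         tmp = []
--         for cell in gene:
--             for node in cell:
--                 for element in node:
--                     tmp.extend(element)
--         pool.append(tmp)
--
--     def transpose(matrix):
--         new_matrix = []
--         for i in range(len(matrix[0])):
--             matrix1 = []
--             for j in range(len(matrix)):
--                 matrix1.append(matrix[j][i])
--             new_matrix.append(matrix1)
--         return new_matrix
--     pool = transpose(pool)
--     return pool
-- ===== SOURCE B (Python) =====
-- def trans_pop(pop):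
--     # generic recursive flatten: recursion on the nesting structure,
--     # not four hard-coded nested loops
--     def flat(x):
--         if isinstance(x, list):
--             out = []
--             for y in x:
--                 out.extend(flat(y))
--             return out
--         return [x]
--
--     # column building by iterator consumption: each gene's flattened stream is
--     # consumed in lock-step, one element per column, with no indexing at all
--     its = [iter(flat(gene)) for gene in pop]
--     width = len(flat(pop[0]))
--     return [[next(it) for it in its] for _ in range(width)]
-- ===== Notes on version B (the rewrite author's own statement) =====
-- stated objective: alternative
-- what changed: B replaces A's four hard-coded nested flattening loops and index-based double-loop transpose by a generic recursive flatten plus a zip-style transpose that consumes one iterator per gene in lock-step, with no element indexing and no row-major intermediate being re-scanned.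
import Mathlib
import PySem

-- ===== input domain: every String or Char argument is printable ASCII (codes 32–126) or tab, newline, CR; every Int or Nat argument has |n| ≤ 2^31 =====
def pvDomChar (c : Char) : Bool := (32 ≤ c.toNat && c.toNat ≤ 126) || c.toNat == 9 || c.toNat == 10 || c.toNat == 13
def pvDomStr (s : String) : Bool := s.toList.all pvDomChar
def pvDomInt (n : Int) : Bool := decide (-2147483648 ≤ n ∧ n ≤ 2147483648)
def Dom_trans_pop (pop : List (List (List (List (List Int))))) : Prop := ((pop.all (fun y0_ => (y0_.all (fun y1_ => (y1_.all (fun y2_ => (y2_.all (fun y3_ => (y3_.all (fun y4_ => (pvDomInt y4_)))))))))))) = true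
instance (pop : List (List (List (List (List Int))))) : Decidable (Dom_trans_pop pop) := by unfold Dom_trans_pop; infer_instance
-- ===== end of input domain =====

-- B replaces the four hard-coded flattening loops and the index-based double-loop transpose
-- by a generic recursive flatten and a zip-style lock-step consumption of one iterator per
-- gene (objective: alternative; same asymptotic cost).

-- ===== PORT A =====
-- flatten one gene, A's way: nested for-loops extending an accumulator
def flatGeneA (gene : List (List (List (List Int)))) : List Int :=
  gene.foldl (fun tmp cell =>
    cell.foldl (fun tmp node =>
      node.foldl (fun tmp element => tmp ++ element) tmp) tmp) []

def trans_pop (pop : List (List (List (List (List Int))))) : List (List Int) :=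
  let pool := pop.foldl (fun pool gene => pool ++ [flatGeneA gene]) []
  -- transpose(pool); matrix[0] / matrix[j][i] use pyGetD — the IndexError cases are excluded by Pre_
  (PySem.List.pyRange 0 ((PySem.List.pyGetD pool 0 []).length : Int) 1).foldl
    (fun nm i =>
      nm ++ [ (PySem.List.pyRange 0 (pool.length : Int) 1).foldl
                (fun m1 j => m1 ++ [PySem.List.pyGetD (PySem.List.pyGetD pool j []) i 0]) [] ]) []

-- ===== PORT B =====
-- Source B's generic recursive 'flat' (isinstance recursion); under the fixed Lean typing the
-- recursion is transcribed level by level, each level being 'for y in x: out.extend(flat(y))'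
def flatB1 (x : List Int) : List Int := x.foldl (fun out y => out ++ [y]) []
def flatB2 (x : List (List Int)) : List Int := x.foldl (fun out y => out ++ flatB1 y) []
def flatB3 (x : List (List (List Int))) : List Int := x.foldl (fun out y => out ++ flatB2 y) []
def flatB4 (x : List (List (List (List Int)))) : List Int := x.foldl (fun out y => out ++ flatB3 y) []

def trans_pop_alt (pop : List (List (List (List (List Int))))) : List (List Int) :=
  -- an iterator over a flattened gene is its list of not-yet-consumed elements;
  -- next(it) = head (exhausted iterator raises in Python — excluded by Pre_, headD here),
  -- advancing = drop 1
  let its := pop.map (fun gene => flatB4 gene)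
  let width := (flatB4 (PySem.List.pyGetD pop 0 [])).length
  ((List.range width).foldl
    (fun (s : List (List Int) × List (List Int)) _ =>
      (s.1 ++ [s.2.map (fun it => it.headD 0)], s.2.map (fun it => it.drop 1)))
    ([], its)).1

-- ===== PRECONDITION & SPEC =====
-- length of a gene once flattened (a shape measure, used only by Pre_)
def flatLen (gene : List (List (List (List Int)))) : Nat :=
  (gene.map (fun cell => (cell.map (fun node => (node.map (·.length)).sum)).sum)).sum

-- Pre_ excludes exactly the inputs where Python A raises IndexError: the empty population
-- (matrix[0]) and populations where some gene flattens to fewer elements than the first gene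
-- (matrix[j][i] out of range). Python B also raises on exactly those inputs.
def Pre_trans_pop (pop : List (List (List (List (List Int))))) : Prop :=
  pop ≠ [] ∧ ∀ g ∈ pop, flatLen (pop.headD []) ≤ flatLen g

instance (pop : List (List (List (List (List Int))))) : Decidable (Pre_trans_pop pop) := by
  unfold Pre_trans_pop; infer_instance

def pvWitness_trans_pop : List (List (List (List (List Int)))) :=
  [[[[[1, 2]], [[3]]]], [[[[4]], [[5, 6]]]]]

def Spec_trans_pop (pop : List (List (List (List (List Int))))) (out : List (List Int)) : Prop := out = trans_pop_alt pop
instance (pop : List (List (List (List (List Int))))) (out : List (List Int)) : Decidable (Spec_trans_pop pop out) := by unfold Spec_trans_pop; infer_instance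

-- ===== CLAIM (what is proved, stated in full; the proofs are below) =====
def Claim_equal_trans_pop : Prop := ∀ (pop : List (List (List (List (List Int))))), Dom_trans_pop pop → Pre_trans_pop pop → Spec_trans_pop pop (trans_pop pop)

-- ===== LEMMAS AND PROOFS =====

-- the two flattenings of a gene agree
theorem foldl_snoc (t : List Int) (init : List Int) :
    t.foldl (fun out y => out ++ [y]) init = init ++ t := by
  induction t generalizing init with
  | nil => simp
  | cons b u ih => simp [List.foldl_cons, ih]

theorem flatB1_eq (x : List Int) : flatB1 x = x := by
  unfold flatB1; rw [foldl_snoc, List.nil_append]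

theorem flatGeneA_eq (gene : List (List (List (List Int)))) : flatGeneA gene = flatB4 gene := by
  simp [flatGeneA, flatB4, flatB3, flatB2, flatB1_eq, PySem.List.foldl_append_eq_flatten]

theorem map_range_getD {α β : Type} (xs : List α) (d : α) (g : α → β) :
    (List.range xs.length).map (fun j => g (xs.getD j d)) = xs.map g := by
  apply List.ext_getElem
  · simp
  · intro i h1 h2
    simp at h1
    simp [List.getD_eq_getElem?_getD, List.getElem?_eq_getElem h1]

-- A's pool-then-transpose, characterised column by column
theorem A_shape (pop : List (List (List (List (List Int))))) :
    trans_pop pop =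
      (List.range (((pop.map flatGeneA).getD 0 []).length)).map
        (fun k => pop.map (fun g => (flatGeneA g).getD k 0)) := by
  simp only [trans_pop, PySem.List.foldl_append_singleton_eq_map, List.nil_append,
    PySem.List.pyRange_zero, List.map_map, Int.toNat_natCast, PySem.List.pyGetD_zero]
  apply List.map_congr_left
  intro k hk
  simp only [Function.comp_def, PySem.List.pyGetD_natCast]
  rw [map_range_getD (pop.map flatGeneA) [] (fun r => r.getD k 0), List.map_map]
  rfl

-- invariant of B's lock-step loop: after m steps the output holds the first m columns and
-- every iterator has consumed its first m elements
theorem foldB (m : Nat) (rows : List (List Int)) (out : List (List Int)) :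
    (List.range m).foldl
      (fun (s : List (List Int) × List (List Int)) _ =>
        (s.1 ++ [s.2.map (fun it => it.headD 0)], s.2.map (fun it => it.drop 1)))
      (out, rows)
    = (out ++ (List.range m).map (fun k => rows.map (fun r => r.getD k 0)),
       rows.map (fun r => r.drop m)) := by
  induction m generalizing rows out with
  | zero => simp
  | succ n ih =>
    rw [List.range_succ, List.foldl_append, ih]
    simp only [List.foldl_cons, List.foldl_nil, List.map_map, List.map_append, List.append_assoc]
    refine Prod.ext ?_ ?_
    · congr 1
      simp [Function.comp_def]
    · simp [Function.comp_def]

theorem ports_eq (pop : List (List (List (List (List Int))))) :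
    trans_pop pop = trans_pop_alt pop := by
  rw [A_shape]
  simp only [trans_pop_alt]
  rw [foldB]
  have hn : ((pop.map flatGeneA).getD 0 []).length = (flatB4 (PySem.List.pyGetD pop 0 [])).length := by
    cases pop with
    | nil => rfl
    | cons p ps => simp [flatGeneA_eq, PySem.List.pyGetD_zero]
  rw [← hn, List.nil_append]
  apply List.map_congr_left
  intro k hk
  simp [flatGeneA_eq]

-- ===== VERDICT (by name: the statement is the Claim_ definition above) =====
theorem trans_pop_spec : Claim_equal_trans_pop := by
  intro pop _ _
  exact ports_eq pop
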